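-- pv_equiv track=rewrite | github.com/dixudx/unsplash-download | unsplash_download/unsplash_download.py | populateImageLists
-- ===== SOURCE A (Python) =====
-- def populateImageLists(images):
--     imagelists = {}
--     idx = 0
--     entry = 0
--     for image in images:
--         imagelists[idx, entry] = image
--         entry += 1
--         if entry == 10:
--             entry = 0
--             idx += 1
--     return imagelists
-- ===== SOURCE B (Python) =====
-- def populateImageLists(images):
--     imagelists = {}
--     n = len(images)
--     idx = 0
--     start = 0
--     while start < n:
--         for entry, image in enumerate(images[start:start + 10]):
--             imagelists[idx, entry] = image
--         idx += 1
--         start += 10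
--     return imagelists
-- ===== Notes on version B (the rewrite author's own statement) =====
-- stated objective: alternative
-- what changed: Replaces A's flat per-item loop with idx/entry counters and a reset branch by a two-level chunked traversal: an outer loop slicing the list into batches of 10 and an inner enumerate over each batch, so no counter ever resets.
import Mathlib
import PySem

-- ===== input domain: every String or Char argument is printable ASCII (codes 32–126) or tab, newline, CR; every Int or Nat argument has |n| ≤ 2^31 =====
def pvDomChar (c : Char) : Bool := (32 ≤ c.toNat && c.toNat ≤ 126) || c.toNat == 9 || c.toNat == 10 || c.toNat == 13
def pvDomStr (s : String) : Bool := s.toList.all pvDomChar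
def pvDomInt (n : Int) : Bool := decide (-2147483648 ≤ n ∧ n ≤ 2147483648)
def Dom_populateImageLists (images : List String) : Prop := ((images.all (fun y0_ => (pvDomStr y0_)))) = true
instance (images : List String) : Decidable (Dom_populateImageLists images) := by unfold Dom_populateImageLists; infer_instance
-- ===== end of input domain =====

-- B replaces A's flat loop with idx/entry counters and a reset branch by a chunked traversal:
-- an outer loop over 10-element slices with an inner enumerate per chunk (alternative decomposition, same cost).

-- ===== PORT A =====
-- A's loop over images carrying the dict and the idx/entry counters, with the entry-reset branch.
def pvLoopA : List String → PySem.Dict (Int × Int) String → Int → Int → PySem.Dict (Int × Int) String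
  | [], d, _, _ => d
  | image :: rest, d, idx, entry =>
    let d' := d.insert (idx, entry) image
    let entry' := entry + 1
    if entry' == 10 then pvLoopA rest d' (idx + 1) 0
    else pvLoopA rest d' idx entry'

def populateImageLists (images : List String) : List (Int × Int × String) :=
  (pvLoopA images PySem.Dict.empty 0 0).items.map (fun p => (p.1.1, p.1.2, p.2))

-- ===== PORT B =====
-- B's while loop: slice out images[start:start+10], fill it in with an inner enumerate loop, advance idx and start.
def pvLoopB (images : List String) (d : PySem.Dict (Int × Int) String) (idx start : Int) :
    PySem.Dict (Int × Int) String :=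
  if _h : start < (images.length : Int) then
    let d' := (PySem.List.enumerate (PySem.List.slice images (some start) (some (start + 10)))).foldl
        (fun d p => d.insert (idx, p.1) p.2) d
    pvLoopB images d' (idx + 1) (start + 10)
  else d
termination_by ((images.length : Int) - start).toNat
decreasing_by omega

def populateImageLists_alt (images : List String) : List (Int × Int × String) :=
  (pvLoopB images PySem.Dict.empty 0 0).items.map (fun p => (p.1.1, p.1.2, p.2))

-- ===== PRECONDITION & SPEC =====
def Spec_populateImageLists (images : List String) (out : List (Int × Int × String)) : Prop := out = populateImageLists_alt images
instance (images : List String) (out : List (Int × Int × String)) : Decidable (Spec_populateImageLists images out) := by unfold Spec_populateImageLists; infer_instance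

-- ===== CLAIM =====
def Claim_equal_populateImageLists : Prop := ∀ (images : List String), Dom_populateImageLists images → Spec_populateImageLists images (populateImageLists images)

-- ===== LEMMAS AND PROOFS =====

-- the canonical value both programs compute: position n carries key (n / 10, n % 10)
def pvC (images : List String) (s : Int) : List (Int × Int × String) :=
  (PySem.List.enumerate images s).map (fun p => (PySem.Int.floordiv p.1 10, PySem.Int.mod p.1 10, p.2))

theorem pvKey_ne {n m : Nat} (h : n ≠ m) :
    ((((n / 10 : Nat) : Int), ((n % 10 : Nat) : Int)) : Int × Int) ≠ (((m / 10 : Nat) : Int), ((m % 10 : Nat) : Int)) := by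
  intro he
  apply h
  rw [Prod.mk.injEq] at he
  have h1 : (n / 10 : Nat) = m / 10 := by exact_mod_cast he.1
  have h2 : (n % 10 : Nat) = m % 10 := by exact_mod_cast he.2
  omega

theorem pvLoopA_invariant (images : List String) : ∀ (n : Nat) (d : PySem.Dict (Int × Int) String),
    (∀ j, j < images.length → d.contains ((((n + j) / 10 : Nat) : Int), (((n + j) % 10 : Nat) : Int)) = false) →
    (pvLoopA images d ((n / 10 : Nat) : Int) ((n % 10 : Nat) : Int)).items.map (fun p => (p.1.1, p.1.2, p.2))
      = d.items.map (fun p => (p.1.1, p.1.2, p.2)) ++ pvC images (n : Int) := by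
  induction images with
  | nil => intro n d _; simp [pvLoopA, pvC, PySem.List.enumerate_nil]
  | cons image rest ih =>
    intro n d hfresh
    have hkey0 : d.contains ((((n) / 10 : Nat) : Int), (((n) % 10 : Nat) : Int)) = false := by
      have := hfresh 0 (by simp)
      simpa using this
    have hitems : (d.insert ((((n) / 10 : Nat) : Int), (((n) % 10 : Nat) : Int)) image).items
        = d.items ++ [(((((n) / 10 : Nat) : Int), (((n) % 10 : Nat) : Int)), image)] :=
      PySem.Dict.items_insert_of_not_contains d image hkey0
    have hfresh' : ∀ j, j < rest.length →
        (d.insert ((((n) / 10 : Nat) : Int), (((n) % 10 : Nat) : Int)) image).contains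
          ((((n + 1 + j) / 10 : Nat) : Int), (((n + 1 + j) % 10 : Nat) : Int)) = false := by
      intro j hj
      rw [PySem.Dict.contains_insert]
      have hne := pvKey_ne (n := n + 1 + j) (m := n) (by omega)
      have hbeq : (((((n + 1 + j) / 10 : Nat) : Int), (((n + 1 + j) % 10 : Nat) : Int)) == ((((n) / 10 : Nat) : Int), (((n) % 10 : Nat) : Int))) = false :=
        beq_eq_false_iff_ne.mpr hne
      have h2 : d.contains ((((n + 1 + j) / 10 : Nat) : Int), (((n + 1 + j) % 10 : Nat) : Int)) = false := by
        have := hfresh (1 + j) (by simp; omega)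
        simpa [show n + (1 + j) = n + 1 + j by omega] using this
      rw [hbeq, h2]
      rfl
    have hrec : (pvLoopA rest (d.insert ((((n) / 10 : Nat) : Int), (((n) % 10 : Nat) : Int)) image)
          (((n + 1) / 10 : Nat) : Int) (((n + 1) % 10 : Nat) : Int)).items.map (fun p => (p.1.1, p.1.2, p.2))
        = (d.insert ((((n) / 10 : Nat) : Int), (((n) % 10 : Nat) : Int)) image).items.map (fun p => (p.1.1, p.1.2, p.2))
          ++ pvC rest ((n + 1 : Nat) : Int) :=
      ih (n + 1) _ hfresh'
    have hfd : PySem.Int.floordiv (n : Int) 10 = ((n / 10 : Nat) : Int) := by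
      exact_mod_cast PySem.Int.floordiv_natCast n 10
    have hmd : PySem.Int.mod (n : Int) 10 = ((n % 10 : Nat) : Int) := by
      exact_mod_cast PySem.Int.mod_natCast n 10
    by_cases h9 : n % 10 = 9
    · have hdiv : (n + 1) / 10 = n / 10 + 1 := by omega
      have hmod : (n + 1) % 10 = 0 := by omega
      have hc : (((n % 10 : Nat) : Int) + 1 == 10) = true := by rw [h9]; decide
      have hstep : pvLoopA (image :: rest) d ((n / 10 : Nat) : Int) ((n % 10 : Nat) : Int)
          = pvLoopA rest (d.insert ((((n) / 10 : Nat) : Int), (((n) % 10 : Nat) : Int)) image)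
              (((n / 10 : Nat) : Int) + 1) 0 := by
        simp only [pvLoopA]
        rw [hc]
        simp
      rw [show (((n + 1) / 10 : Nat) : Int) = (((n / 10 : Nat) : Int) + 1) by rw [hdiv]; push_cast; ring,
          show (((n + 1) % 10 : Nat) : Int) = (0 : Int) by rw [hmod]; simp] at hrec
      rw [hstep, hrec, hitems]
      unfold pvC
      rw [PySem.List.enumerate_cons]
      simp only [List.map_append, List.map_cons, List.append_assoc, hfd, hmd]
      norm_num
    · have h10 : n % 10 < 10 := Nat.mod_lt _ (by omega)
      have hdiv : (n + 1) / 10 = n / 10 := by omega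
      have hmod : (n + 1) % 10 = n % 10 + 1 := by omega
      have hstep : pvLoopA (image :: rest) d ((n / 10 : Nat) : Int) ((n % 10 : Nat) : Int)
          = pvLoopA rest (d.insert ((((n) / 10 : Nat) : Int), (((n) % 10 : Nat) : Int)) image)
              ((n / 10 : Nat) : Int) (((n % 10 : Nat) : Int) + 1) := by
        have hc : (((n % 10 : Nat) : Int) + 1 == 10) = false := by
          rw [beq_eq_false_iff_ne]
          intro hc
          exact h9 (by exact_mod_cast (by omega : ((n % 10 : Nat) : Int) = 9))
        simp only [pvLoopA]
        rw [hc]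
        simp
      rw [show (((n + 1) / 10 : Nat) : Int) = ((n / 10 : Nat) : Int) by rw [hdiv],
          show (((n + 1) % 10 : Nat) : Int) = (((n % 10 : Nat) : Int) + 1) by rw [hmod]; push_cast; ring] at hrec
      rw [hstep, hrec, hitems]
      unfold pvC
      rw [PySem.List.enumerate_cons]
      simp only [List.map_append, List.map_cons, List.append_assoc, hfd, hmd]
      norm_num

-- a batch at chunk index k, enumerated from 0, contributes exactly the divmod-keyed entries
theorem pvChunkMap (xs : List String) : ∀ (k j : Nat), j + xs.length ≤ 10 →
    (PySem.List.enumerate xs ((j : Nat) : Int)).map (fun p => (((k : Nat) : Int), p.1, p.2))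
      = pvC xs ((10 * k + j : Nat) : Int) := by
  induction xs with
  | nil => intro k j _; simp [pvC, PySem.List.enumerate_nil]
  | cons x xs ih =>
    intro k j hle
    have hj : j < 10 := by simp at hle; omega
    have hfd : PySem.Int.floordiv ((10 * k + j : Nat) : Int) 10 = ((k : Nat) : Int) := by
      have h := PySem.Int.floordiv_natCast (10 * k + j) 10
      rw [show (10 * k + j) / 10 = k from by omega] at h
      exact_mod_cast h
    have hmd : PySem.Int.mod ((10 * k + j : Nat) : Int) 10 = ((j : Nat) : Int) := by
      have h := PySem.Int.mod_natCast (10 * k + j) 10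
      rw [show (10 * k + j) % 10 = j from by omega] at h
      exact_mod_cast h
    have ht := ih k (j + 1) (by simp at hle ⊢; omega)
    unfold pvC at ht ⊢
    rw [PySem.List.enumerate_cons, PySem.List.enumerate_cons]
    simp only [List.map_cons, hfd, hmd]
    rw [show ((j : Nat) : Int) + 1 = ((j + 1 : Nat) : Int) by push_cast; ring,
        show ((10 * k + j : Nat) : Int) + 1 = ((10 * k + (j + 1) : Nat) : Int) by push_cast; ring, ht]

theorem pvLoopB_invariant (images : List String) : ∀ (m k : Nat) (d : PySem.Dict (Int × Int) String),
    images.length ≤ 10 * (k + m) →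
    (∀ (a b : Nat), k ≤ a → d.contains (((a : Nat) : Int), ((b : Nat) : Int)) = false) →
    (pvLoopB images d ((k : Nat) : Int) ((10 * k : Nat) : Int)).items.map (fun p => (p.1.1, p.1.2, p.2))
      = d.items.map (fun p => (p.1.1, p.1.2, p.2)) ++ pvC (images.drop (10 * k)) ((10 * k : Nat) : Int) := by
  intro m
  induction m with
  | zero =>
    intro k d hlen _
    have hstop : ¬ (((10 * k : Nat) : Int) < (images.length : Int)) := by push_cast; omega
    rw [pvLoopB, dif_neg hstop, List.drop_of_length_le (by omega)]
    simp [pvC, PySem.List.enumerate_nil]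
  | succ m ih =>
    intro k d hlen hfresh
    by_cases hlt : 10 * k < images.length
    · have hlt' : (((10 * k : Nat) : Int) < (images.length : Int)) := by push_cast; omega
      have hslice : PySem.List.slice images (some ((10 * k : Nat) : Int)) (some (((10 * k : Nat) : Int) + 10))
          = (images.drop (10 * k)).take 10 := by
        have h := PySem.List.slice_natCast_add images (10 * k) 10
        exact_mod_cast h
      set chunk := (images.drop (10 * k)).take 10 with hchunk
      set l := PySem.List.enumerate chunk 0 with hl
      -- inner loop: fresh distinct keys append
      have hmem1 : ∀ a ∈ l, d.contains (((k : Nat) : Int), a.1) = false := by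
        intro a ha
        rw [hl, PySem.List.mem_enumerate_iff] at ha
        obtain ⟨j', hj', rfl⟩ := ha
        have := hfresh k j' (le_refl k)
        simpa using this
      have hnd : (l.map (fun a => (((k : Nat) : Int), a.1))).Nodup := by
        have hp := PySem.List.pairwise_lt_enumerate chunk (0 : Int)
        rw [hl]
        unfold List.Nodup
        rw [List.pairwise_map]
        exact hp.imp (fun h => by simp only [ne_eq, Prod.mk.injEq, true_and]; exact ne_of_lt h)
      have hitems : (l.foldl (fun d p => d.insert (((k : Nat) : Int), p.1) p.2) d).items
          = d.items ++ l.map (fun a => ((((k : Nat) : Int), a.1), a.2)) :=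
        PySem.Dict.items_foldl_insert_fresh l (fun a => (((k : Nat) : Int), a.1)) (fun a => a.2) d hmem1 hnd
      set d' := l.foldl (fun d p => d.insert (((k : Nat) : Int), p.1) p.2) d with hd'
      have hkeys : d'.keys = PySem.Set.update d.keys (l.map (fun a => (((k : Nat) : Int), a.1))) := by
        rw [hd']
        exact PySem.Dict.keys_foldl_insert_key l (fun a => (((k : Nat) : Int), a.1)) (fun d p => p.2) d
      have hfresh' : ∀ (a b : Nat), k + 1 ≤ a → d'.contains (((a : Nat) : Int), ((b : Nat) : Int)) = false := by
        intro a b hab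
        rw [← Bool.not_eq_true, PySem.Dict.contains_iff_mem_keys, hkeys, PySem.Set.mem_update]
        push Not
        constructor
        · have hc := hfresh a b (by omega)
          intro hmem
          rw [← PySem.Dict.contains_iff_mem_keys] at hmem
          rw [hc] at hmem
          exact Bool.false_ne_true hmem
        · intro hmem
          rw [List.mem_map] at hmem
          obtain ⟨p, _, hp⟩ := hmem
          have h1 : ((k : Nat) : Int) = ((a : Nat) : Int) := congrArg Prod.fst hp
          have : k = a := by exact_mod_cast h1
          omega
      have hstep : pvLoopB images d ((k : Nat) : Int) ((10 * k : Nat) : Int)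
          = pvLoopB images d' (((k + 1) : Nat) : Int) ((10 * (k + 1) : Nat) : Int) := by
        rw [pvLoopB, dif_pos hlt']
        rw [hslice, ← hl, ← hd']
        congr 1
      have hrec := ih (k + 1) d' (by omega) hfresh'
      rw [hstep, hrec, hitems]
      have hchunklen : chunk.length = min 10 (images.length - 10 * k) := by
        rw [hchunk]; simp
      have hcmap : l.map (fun a => (((k : Nat) : Int), a.1, a.2)) = pvC chunk ((10 * k : Nat) : Int) := by
        have h := pvChunkMap chunk k 0 (by omega)
        rw [Nat.cast_zero] at h
        rw [hl]
        rw [show 10 * k + 0 = 10 * k from by omega] at h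
        exact h
      have hsplit : images.drop (10 * k) = chunk ++ images.drop (10 * (k + 1)) := by
        rw [hchunk, show 10 * (k + 1) = 10 * k + 10 from by ring, ← List.drop_drop]
        exact (List.take_append_drop 10 (images.drop (10 * k))).symm
      have htail : pvC (images.drop (10 * k)) ((10 * k : Nat) : Int)
          = pvC chunk ((10 * k : Nat) : Int) ++ pvC (images.drop (10 * (k + 1))) ((10 * (k + 1) : Nat) : Int) := by
        by_cases hsmall : images.length ≤ 10 * k + 10
        · have hnil : images.drop (10 * (k + 1)) = [] :=
            List.drop_of_length_le (by omega)
          rw [hsplit, hnil, List.append_nil]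
          simp [pvC, PySem.List.enumerate_nil]
        · have hlen10 : chunk.length = 10 := by omega
          rw [hsplit]
          unfold pvC
          rw [PySem.List.enumerate_append, List.map_append, hlen10]
          congr 3
      rw [htail, List.map_append, List.map_map]
      have hcomp : ((fun p => (p.1.1, p.1.2, p.2)) ∘ (fun a => ((((k : Nat) : Int), a.1), a.2)) : Int × String → Int × Int × String)
          = fun a => (((k : Nat) : Int), a.1, a.2) := by
        funext a; rfl
      rw [hcomp, hcmap, List.append_assoc]
    · have hstop : ¬ (((10 * k : Nat) : Int) < (images.length : Int)) := by push_cast; omega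
      rw [pvLoopB, dif_neg hstop, List.drop_of_length_le (by omega)]
      simp [pvC, PySem.List.enumerate_nil]

-- ===== VERDICT =====
theorem populateImageLists_spec : Claim_equal_populateImageLists := by
  intro images _
  unfold Spec_populateImageLists populateImageLists populateImageLists_alt
  have hA := pvLoopA_invariant images 0 PySem.Dict.empty (by intro j _; rfl)
  have hB := pvLoopB_invariant images (images.length) 0 PySem.Dict.empty (by omega)
    (by intro a b _; rfl)
  simp only [Nat.zero_div, Nat.zero_mod, Nat.mul_zero, Nat.cast_zero, List.drop_zero] at hA hB
  rw [hA, hB]
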